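-- pv_equiv track=rewrite | github.com/rjsengar/leetcode | Easy/Maximum number of zeroes/maximum-number-of-zeroes.py | MaxZero
-- ===== SOURCE A (Python) =====
-- def MaxZero(arr, n):
--     m=0
--     ma=-1
--     for i in arr:
--         s=str(i)
--         c=s.count('0')
--         if c>m:
--             ma=i
--             m=c
--         if c and c==m:
--             ma=max(ma,i)
--     return ma
-- ===== SOURCE B (Python) =====
-- def MaxZero(arr, n):
--     best = max((str(i).count('0') for i in arr), default=0)
--     if best == 0:
--         return -1
--     return max(i for i in arr if str(i).count('0') == best)
-- ===== Notes on version B (the rewrite author's own statement) =====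
-- stated objective: simpler
-- what changed: Replaces the single fused loop that threads both the running zero-count maximum and the running best element through two interacting if-branches with a two-phase reduce-then-filter-and-select: first the maximum zero-digit count, then the largest element attaining it (-1 when no element contains a zero).
import Mathlib
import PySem

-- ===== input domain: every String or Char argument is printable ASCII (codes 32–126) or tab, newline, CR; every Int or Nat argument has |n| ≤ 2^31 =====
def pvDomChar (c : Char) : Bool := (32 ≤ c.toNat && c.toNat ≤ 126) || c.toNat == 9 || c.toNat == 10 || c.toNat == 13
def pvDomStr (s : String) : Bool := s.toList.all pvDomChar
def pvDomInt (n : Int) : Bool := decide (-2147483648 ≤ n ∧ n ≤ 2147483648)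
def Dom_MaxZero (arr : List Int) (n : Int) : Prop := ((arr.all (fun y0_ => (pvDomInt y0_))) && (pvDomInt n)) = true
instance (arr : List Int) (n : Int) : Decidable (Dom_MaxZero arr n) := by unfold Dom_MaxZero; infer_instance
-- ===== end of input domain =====

-- B replaces A's fused loop (running max-count and running best element updated together)
-- by a two-phase reduce-then-filter-and-select; return values proved equal on all of Dom.

-- str(i).count('0'), computed by both Pythons
def pvZc (i : Int) : Int := (PySem.Str.count (PySem.Int.toStr i) "0" : Int)

-- ===== PORT A =====
-- A's loop over arr with state (m, ma); branches in A's order, second test uses the updated m.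
def MaxZeroGo : List Int → Int → Int → Int
  | [], _m, ma => ma
  | i :: t, m, ma =>
    let c := pvZc i
    let m' := if c > m then c else m
    let ma' := if c > m then i else ma
    let ma'' := if c ≠ 0 ∧ c = m' then max ma' i else ma'
    MaxZeroGo t m' ma''

def MaxZero (arr : List Int) (_n : Int) : Int := MaxZeroGo arr 0 (-1)

-- ===== PORT B =====
-- best = max(gen, default=0); then max over the elements whose zero count equals best.
-- The .getD (-1) arm is unreachable: best ≠ 0 forces the filtered list to be nonempty.
def MaxZero_alt (arr : List Int) (_n : Int) : Int :=
  let best := match arr.map pvZc with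
    | [] => 0
    | c :: cs => cs.foldl max c
  if best = 0 then -1
  else (PySem.List.max? (arr.filter (fun i => pvZc i == best)) (fun x => x)).getD (-1)

-- ===== PRECONDITION & SPEC =====
def Spec_MaxZero (arr : List Int) (n : Int) (out : Int) : Prop := out = MaxZero_alt arr n
instance (arr : List Int) (n : Int) (out : Int) : Decidable (Spec_MaxZero arr n out) := by unfold Spec_MaxZero; infer_instance

-- ===== CLAIM (what is proved, stated in full; the proofs are below) =====
def Claim_equal_MaxZero : Prop := ∀ (arr : List Int) (n : Int), Dom_MaxZero arr n → Spec_MaxZero arr n (MaxZero arr n)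

-- ===== LEMMAS AND PROOFS =====

theorem pvZc_nonneg (i : Int) : 0 ≤ pvZc i := Int.natCast_nonneg _

theorem foldl_max_init_le (l : List Int) (b : Int) : b ≤ l.foldl max b := by
  induction l generalizing b with
  | nil => exact le_refl b
  | cons x t ih => exact le_trans (le_max_left b x) (ih (max b x))

theorem foldl_max_comm (l : List Int) (a b : Int) :
    max a (l.foldl max b) = l.foldl max (max a b) := by
  induction l generalizing b with
  | nil => rfl
  | cons x t ih =>
    simp only [List.foldl_cons]
    rw [ih (max b x), max_assoc]

-- abbreviation used only in the proofs
def pvMaxF (l : List Int) (c : Int) : Int :=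
  (PySem.List.max? (l.filter (fun i => pvZc i == c)) (fun x => x)).getD (-1)

theorem pvMaxF_cons_eq (l : List Int) (i c : Int) (h : pvZc i = c) :
    pvMaxF (i :: l) c = max i (if (l.filter (fun j => pvZc j == c)) = [] then i else pvMaxF l c) := by
  have hb : (pvZc i == c) = true := by simp [h]
  unfold pvMaxF
  rw [List.filter_cons, if_pos hb]
  cases hf : l.filter (fun j => pvZc j == c) with
  | nil =>
    rw [if_pos rfl, PySem.List.max?_id_cons]
    simp
  | cons x r =>
    rw [if_neg (by simp), PySem.List.max?_id_cons, PySem.List.max?_id_cons]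
    simp only [Option.getD_some]
    rw [foldl_max_comm, List.foldl_cons]

theorem pvMaxF_cons_ne (l : List Int) (i c : Int) (h : pvZc i ≠ c) :
    pvMaxF (i :: l) c = pvMaxF l c := by
  unfold pvMaxF
  rw [List.filter_cons, if_neg (by simp [h])]

-- the characterisation of A's loop
theorem go_spec (l : List Int) : ∀ (m ma : Int), 0 ≤ m →
    MaxZeroGo l m ma =
      (if m < (l.map pvZc).foldl max m then pvMaxF l ((l.map pvZc).foldl max m)
       else if 0 < m ∧ (l.filter (fun i => pvZc i == m)) ≠ [] then max ma (pvMaxF l m)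
       else ma) := by
  induction l with
  | nil =>
    intro m ma _
    simp [MaxZeroGo]
  | cons i t ih =>
    intro m ma hm
    have hc : 0 ≤ pvZc i := pvZc_nonneg i
    simp only [MaxZeroGo, List.map_cons, List.foldl_cons]
    by_cases hgt : pvZc i > m
    · -- state becomes (pvZc i, i)
      have hc0 : pvZc i ≠ 0 := by omega
      rw [if_pos hgt, if_pos (And.intro hc0 rfl), if_pos hgt, max_self]
      have hK : max m (pvZc i) = pvZc i := max_eq_right (le_of_lt hgt)
      rw [ih (pvZc i) i (le_of_lt (lt_of_le_of_lt hm hgt)), hK]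
      set K := (t.map pvZc).foldl max (pvZc i) with hKdef
      have hKge : pvZc i ≤ K := foldl_max_init_le _ _
      by_cases hK2 : pvZc i < K
      · rw [if_pos hK2, if_pos (lt_trans hgt hK2), pvMaxF_cons_ne t i K (by omega)]
      · have hKeq : K = pvZc i := le_antisymm (not_lt.mp hK2) hKge
        rw [if_neg hK2, if_pos (show m < K by omega), hKeq, pvMaxF_cons_eq t i (pvZc i) rfl]
        have hpos : 0 < pvZc i := by omega
        by_cases hf : t.filter (fun j => pvZc j == pvZc i) = []
        · rw [if_neg (show ¬(0 < pvZc i ∧ t.filter (fun j => pvZc j == pvZc i) ≠ []) from by simp [hf]),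
              if_pos hf, max_self]
        · rw [if_pos (And.intro hpos hf), if_neg hf]
    · -- m unchanged
      have hle : pvZc i ≤ m := not_lt.mp hgt
      have hK : max m (pvZc i) = m := max_eq_left hle
      rw [if_neg hgt, if_neg hgt]
      by_cases heq : pvZc i ≠ 0 ∧ pvZc i = m
      · -- tie with positive count: ma := max ma i
        obtain ⟨h0, hem⟩ := heq
        have hpos : 0 < m := by omega
        rw [if_pos (And.intro h0 hem), ih m (max ma i) hm, hK]
        set K := (t.map pvZc).foldl max m with hKdef
        have hKge : m ≤ K := foldl_max_init_le _ _
        by_cases hK2 : m < K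
        · rw [if_pos hK2, if_pos hK2, pvMaxF_cons_ne t i K (by omega)]
        · rw [if_neg hK2, if_neg hK2]
          have hmem : (i :: t).filter (fun j => pvZc j == m) ≠ [] := by
            simp [hem]
          rw [if_pos (And.intro hpos hmem), pvMaxF_cons_eq t i m hem]
          by_cases hf : t.filter (fun j => pvZc j == m) = []
          · rw [if_neg (show ¬(0 < m ∧ t.filter (fun j => pvZc j == m) ≠ []) from by simp [hf]),
                if_pos hf, max_self]
          · rw [if_pos (And.intro hpos hf), if_neg hf, max_assoc]
      · -- no update at all
        rw [if_neg heq, ih m ma hm, hK]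
        set K := (t.map pvZc).foldl max m with hKdef
        by_cases hK2 : m < K
        · rw [if_pos hK2, if_pos hK2, pvMaxF_cons_ne t i K (by omega)]
        · rw [if_neg hK2, if_neg hK2]
          by_cases hem : pvZc i = m
          · -- then pvZc i = 0 = m, so neither condition can hold
            have h0 : pvZc i = 0 := by
              by_contra h
              exact heq ⟨h, hem⟩
            have hm0 : m = 0 := by omega
            rw [if_neg (by simp [hm0]), if_neg (by simp [hm0])]
          · have hfe : (i :: t).filter (fun j => pvZc j == m) = t.filter (fun j => pvZc j == m) := by
              rw [List.filter_cons, if_neg (by simp [hem])]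
            rw [hfe, pvMaxF_cons_ne t i m hem]

-- ===== VERDICT (by name: the statement is the Claim_ definition above) =====
theorem MaxZero_spec : Claim_equal_MaxZero := by
  intro arr n _
  unfold Spec_MaxZero MaxZero MaxZero_alt
  rw [go_spec arr 0 (-1) le_rfl]
  cases harr : arr with
  | nil => simp
  | cons a t =>
    simp only [List.map_cons, List.foldl_cons]
    have hc : 0 ≤ pvZc a := pvZc_nonneg a
    rw [max_eq_right hc]
    set K := (t.map pvZc).foldl max (pvZc a) with hKdef
    have hKge : pvZc a ≤ K := foldl_max_init_le _ _
    by_cases hK : 0 < K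
    · rw [if_pos hK, if_neg (by omega : ¬ K = 0)]
      rfl
    · have hK0 : K = 0 := le_antisymm (not_lt.mp hK) (le_trans hc hKge)
      rw [if_neg hK, hK0]
      simp
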